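-- pv_equiv track=rewrite | github.com/mjpr-3435/AeternumBot | .mdaddons/mdplugins/finder.py | _build_region_by_chunk
-- ===== SOURCE A (Python) =====
-- def         _build_region_by_chunk(xmin, xmax, ymin, ymax, zmin, zmax):
--     region_by_chunk = {}
--
--     for x in range(xmin, xmax + 1):
--         for y in range(ymin, ymax + 1):
--             for z in range(zmin, zmax + 1):
--                 chunk_x = x // 16
--                 chunk_z = z // 16
--                 key = (chunk_x, chunk_z)
--
--                 if key not in region_by_chunk:
--                     region_by_chunk[key] = []
--
--                 region_by_chunk[key].append((x, y, z))
--
--     return region_by_chunk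
-- ===== SOURCE B (Python) =====
-- def _build_region_by_chunk(xmin, xmax, ymin, ymax, zmin, zmax):
--     if xmin > xmax or ymin > ymax or zmin > zmax:
--         return {}
--     ys = range(ymin, ymax + 1)
--     xs_by_chunk = [(cx, range(max(xmin, 16 * cx), min(xmax, 16 * cx + 15) + 1))
--                    for cx in range(xmin // 16, xmax // 16 + 1)]
--     zs_by_chunk = [(cz, range(max(zmin, 16 * cz), min(zmax, 16 * cz + 15) + 1))
--                    for cz in range(zmin // 16, zmax // 16 + 1)]
--     region_by_chunk = {}
--     for cx, xs in xs_by_chunk: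
--         for cz, zs in zs_by_chunk:
--             vals = [(x, y, z) for x in xs for y in ys for z in zs]
--             region_by_chunk[(cx, cz)] = vals
--     return region_by_chunk
-- ===== Notes on version B (the rewrite author's own statement) =====
-- stated objective: alternative
-- what changed: Replaces the flat x/y/z triple loop with a dict membership test and append per point by first indexing x- and z-values per 16-chunk, then iterating chunk columns and assigning each (cx,cz) key its whole value list at once (with an empty-box fast path).
import Mathlib
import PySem

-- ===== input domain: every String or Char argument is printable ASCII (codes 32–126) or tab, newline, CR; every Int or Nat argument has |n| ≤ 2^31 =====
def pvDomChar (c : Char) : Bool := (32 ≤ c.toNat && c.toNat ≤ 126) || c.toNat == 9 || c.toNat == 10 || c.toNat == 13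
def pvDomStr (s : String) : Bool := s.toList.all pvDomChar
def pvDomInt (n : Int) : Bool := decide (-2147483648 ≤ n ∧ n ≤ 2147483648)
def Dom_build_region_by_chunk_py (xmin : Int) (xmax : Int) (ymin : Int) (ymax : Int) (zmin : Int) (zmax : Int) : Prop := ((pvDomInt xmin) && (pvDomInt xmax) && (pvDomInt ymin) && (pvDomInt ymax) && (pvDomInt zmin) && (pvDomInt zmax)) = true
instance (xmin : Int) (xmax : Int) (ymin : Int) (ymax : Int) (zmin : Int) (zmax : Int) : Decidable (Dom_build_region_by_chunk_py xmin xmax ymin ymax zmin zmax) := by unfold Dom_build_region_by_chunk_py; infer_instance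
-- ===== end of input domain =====

-- B groups the box per 16×16 chunk column and assigns each (cx,cz) key its whole value list at
-- once, instead of A's flat x/y/z triple loop doing a dict membership test and append per point.

-- ===== PORT A =====
def build_region_by_chunk_py (xmin : Int) (xmax : Int) (ymin : Int) (ymax : Int) (zmin : Int) (zmax : Int) : List (Int × Int × List (Int × Int × Int)) :=
  let region : PySem.Dict (Int × Int) (List (Int × Int × Int)) :=
    (PySem.List.pyRange xmin (xmax + 1)).foldl (fun d x =>
      (PySem.List.pyRange ymin (ymax + 1)).foldl (fun d y =>
        (PySem.List.pyRange zmin (zmax + 1)).foldl (fun d z =>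
          let chunk_x := PySem.Int.floordiv x 16
          let chunk_z := PySem.Int.floordiv z 16
          let key := (chunk_x, chunk_z)
          let d := if d.contains key then d else d.insert key ([] : List (Int × Int × Int))
          d.modify key [] (fun old => old ++ [(x, y, z)])) d) d)
      PySem.Dict.empty
  region.items.map (fun e => (e.1.1, e.1.2, e.2))

-- ===== PORT B =====
def build_region_by_chunk_py_alt (xmin : Int) (xmax : Int) (ymin : Int) (ymax : Int) (zmin : Int) (zmax : Int) : List (Int × Int × List (Int × Int × Int)) :=
  if xmin > xmax ∨ ymin > ymax ∨ zmin > zmax then []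
  else
  let ys := PySem.List.pyRange ymin (ymax + 1)
  let xsByChunk := (PySem.List.pyRange (PySem.Int.floordiv xmin 16) (PySem.Int.floordiv xmax 16 + 1)).map
      (fun cx => (cx, PySem.List.pyRange (max xmin (16 * cx)) (min xmax (16 * cx + 15) + 1)))
  let zsByChunk := (PySem.List.pyRange (PySem.Int.floordiv zmin 16) (PySem.Int.floordiv zmax 16 + 1)).map
      (fun cz => (cz, PySem.List.pyRange (max zmin (16 * cz)) (min zmax (16 * cz + 15) + 1)))
  let region : PySem.Dict (Int × Int) (List (Int × Int × Int)) :=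
    xsByChunk.foldl (fun d p =>
      zsByChunk.foldl (fun d q =>
        let vals := p.2.flatMap (fun x => ys.flatMap (fun y => q.2.map (fun z => (x, y, z))))
        d.insert (p.1, q.1) vals) d) PySem.Dict.empty
  region.items.map (fun e => (e.1.1, e.1.2, e.2))

-- ===== PRECONDITION & SPEC =====
def Spec_build_region_by_chunk_py (xmin : Int) (xmax : Int) (ymin : Int) (ymax : Int) (zmin : Int) (zmax : Int) (out : List (Int × Int × List (Int × Int × Int))) : Prop := out = build_region_by_chunk_py_alt xmin xmax ymin ymax zmin zmax
instance (xmin : Int) (xmax : Int) (ymin : Int) (ymax : Int) (zmin : Int) (zmax : Int) (out : List (Int × Int × List (Int × Int × Int))) : Decidable (Spec_build_region_by_chunk_py xmin xmax ymin ymax zmin zmax out) := by unfold Spec_build_region_by_chunk_py; infer_instance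

-- ===== CLAIM (what is proved, stated in full; the proofs are below) =====
def Claim_equal_build_region_by_chunk_py : Prop := ∀ (xmin : Int) (xmax : Int) (ymin : Int) (ymax : Int) (zmin : Int) (zmax : Int), Dom_build_region_by_chunk_py xmin xmax ymin ymax zmin zmax → Spec_build_region_by_chunk_py xmin xmax ymin ymax zmin zmax (build_region_by_chunk_py xmin xmax ymin ymax zmin zmax)

-- ===== LEMMAS AND PROOFS =====

-- proof-side abbreviations: the clipped per-chunk ranges, chunk ranges, the lexicographic
-- product of three ranges, the chunk key of a point, and the chunk-pair product
def pvClip (a b c : Int) : List Int := PySem.List.pyRange (max a (16 * c)) (min b (16 * c + 15) + 1)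
def pvChunks (a b : Int) : List Int := PySem.List.pyRange (PySem.Int.floordiv a 16) (PySem.Int.floordiv b 16 + 1)
def pvProd (xs ys zs : List Int) : List (Int × Int × Int) := xs.flatMap (fun x => ys.flatMap (fun y => zs.map (fun z => (x, y, z))))
def pvKey (v : Int × Int × Int) : Int × Int := (PySem.Int.floordiv v.1 16, PySem.Int.floordiv v.2.2 16)
def pvPairs (xmin xmax zmin zmax : Int) : List (Int × Int) := (pvChunks xmin xmax).flatMap (fun cx => (pvChunks zmin zmax).map (fun cz => (cx, cz)))

-- the floor-division bracket for divisor 16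
lemma pv_fdiv16 (n c : Int) : PySem.Int.floordiv n 16 = c ↔ 16 * c ≤ n ∧ n < 16 * c + 16 := by
  rw [PySem.Int.floordiv_eq_iff_of_pos (by norm_num : (0:Int) < 16)]; constructor <;> intro h <;> omega

lemma pv_fdiv16_self (n : Int) : 16 * (PySem.Int.floordiv n 16) ≤ n ∧ n < 16 * (PySem.Int.floordiv n 16) + 16 :=
  (pv_fdiv16 n _).mp rfl

lemma pv_mem_clip {a b c n : Int} (h : n ∈ pvClip a b c) : a ≤ n ∧ n ≤ b ∧ PySem.Int.floordiv n 16 = c := by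
  rw [pvClip, PySem.List.mem_pyRange_one] at h
  refine ⟨by omega, by omega, (pv_fdiv16 n c).mpr (by omega)⟩

lemma pv_clip_mem {a b c : Int} (hab : a ≤ b) (hc : c ∈ pvChunks a b) : max a (16 * c) ∈ pvClip a b c := by
  rw [pvChunks, PySem.List.mem_pyRange_one] at hc
  have ha := pv_fdiv16_self a
  have hb := pv_fdiv16_self b
  rw [pvClip, PySem.List.mem_pyRange_one]
  omega

lemma pv_clip_ne_nil {a b c : Int} (hab : a ≤ b) (hc : c ∈ pvChunks a b) : pvClip a b c ≠ [] :=
  List.ne_nil_of_mem (pv_clip_mem hab hc)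

-- a contiguous range splits into its chunk clips
lemma pv_range_decomp (a b : Int) : PySem.List.pyRange a (b + 1) = (pvChunks a b).flatMap (fun c => pvClip a b c) := by
  have hpwR : List.Pairwise (· < ·) ((pvChunks a b).flatMap (fun c => pvClip a b c)) := by
    rw [List.pairwise_flatMap]
    refine ⟨fun c _ => PySem.List.pairwise_lt_pyRange_one _ _, ?_⟩
    refine (PySem.List.pairwise_lt_pyRange_one _ _).imp_of_mem ?_
    intro c c' hc hc' hlt x hx y hy
    simp only [pvClip, PySem.List.mem_pyRange_one] at hx hy
    omega
  have hpwL := PySem.List.pairwise_lt_pyRange_one a (b + 1)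
  have hmem : ∀ n : Int, n ∈ PySem.List.pyRange a (b + 1) ↔ n ∈ (pvChunks a b).flatMap (fun c => pvClip a b c) := by
    intro n
    rw [PySem.List.mem_pyRange_one, List.mem_flatMap]
    constructor
    · intro hn
      refine ⟨PySem.Int.floordiv n 16, ?_, ?_⟩
      · rw [pvChunks, PySem.List.mem_pyRange_one]
        have := pv_fdiv16_self n; have := pv_fdiv16_self a; have := pv_fdiv16_self b
        omega
      · rw [pvClip, PySem.List.mem_pyRange_one]
        have := pv_fdiv16_self n
        omega
    · rintro ⟨c, hc, hn⟩
      rw [pvClip, PySem.List.mem_pyRange_one] at hn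
      omega
  exact List.Perm.eq_of_pairwise (fun u v _ _ h1 h2 => le_antisymm h1 h2)
    (hpwL.imp le_of_lt) (hpwR.imp le_of_lt)
    ((List.perm_ext_iff_of_nodup (hpwL.imp ne_of_lt) (hpwR.imp ne_of_lt)).mpr hmem)

-- filtering a range by chunk index gives the clip
lemma pv_filter_chunk (a b c : Int) : (PySem.List.pyRange a (b + 1)).filter (fun n => PySem.Int.floordiv n 16 == c) = pvClip a b c := by
  have hpwL := (PySem.List.pairwise_lt_pyRange_one a (b + 1)).filter (fun n => PySem.Int.floordiv n 16 == c)
  have hpwR := PySem.List.pairwise_lt_pyRange_one (max a (16 * c)) (min b (16 * c + 15) + 1)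
  have hmem : ∀ n : Int, n ∈ (PySem.List.pyRange a (b + 1)).filter (fun n => PySem.Int.floordiv n 16 == c) ↔ n ∈ pvClip a b c := by
    intro n
    rw [List.mem_filter, PySem.List.mem_pyRange_one, pvClip, PySem.List.mem_pyRange_one, beq_iff_eq, pv_fdiv16]
    omega
  exact List.Perm.eq_of_pairwise (fun u v _ _ h1 h2 => le_antisymm h1 h2)
    (hpwL.imp le_of_lt) (hpwR.imp le_of_lt)
    ((List.perm_ext_iff_of_nodup (hpwL.imp ne_of_lt) (hpwR.imp ne_of_lt)).mpr hmem)

-- Set helpers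
lemma pv_update_subset {α : Type} [BEq α] [LawfulBEq α] (s : PySem.Set α) (l : List α) (h : ∀ x ∈ l, x ∈ s) : PySem.Set.update s l = s := by
  rw [PySem.Set.update_eq_append_filter]
  have : List.filter (fun y => !s.contains y) (PySem.Set.ofList l) = [] := by
    rw [List.filter_eq_nil_iff]
    intro a ha
    have : a ∈ s := h a ((PySem.Set.mem_ofList l a).mp ha)
    simp [PySem.Set.contains_eq_listContains, this]
  rw [this, List.append_nil]

lemma pv_ofList_flatMap_const {α β : Type} [BEq α] [LawfulBEq α] (l : List β) (blk : List α) (h : l ≠ []) :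
    PySem.Set.ofList (l.flatMap (fun _ => blk)) = PySem.Set.ofList blk := by
  cases l with
  | nil => exact absurd rfl h
  | cons a t =>
    rw [List.flatMap_cons, PySem.Set.ofList_append]
    apply pv_update_subset
    intro x hx
    rw [List.mem_flatMap] at hx
    obtain ⟨_, _, hx⟩ := hx
    exact (PySem.Set.mem_ofList blk x).mpr hx

lemma pv_ofList_flatMap_disjoint {α β : Type} [BEq α] [LawfulBEq α] (cs : List β) (Bf : β → List α)
    (h : List.Pairwise (fun c c' => ∀ x ∈ Bf c, x ∉ Bf c') cs) :
    PySem.Set.ofList (cs.flatMap Bf) = cs.flatMap (fun c => PySem.Set.ofList (Bf c)) := by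
  induction cs using List.reverseRecOn with
  | nil => rfl
  | append_singleton cs c ih =>
    rw [List.pairwise_append] at h
    rw [List.flatMap_append, List.flatMap_append, List.flatMap_singleton, List.flatMap_singleton,
      PySem.Set.ofList_append, ih h.1, PySem.Set.update_eq_append_filter]
    congr 1
    rw [List.filter_eq_self]
    intro y hy
    have hyB : y ∈ Bf c := (PySem.Set.mem_ofList _ y).mp hy
    simp [PySem.Set.contains_eq_listContains, List.mem_flatMap, PySem.Set.mem_ofList]
    intro c' hc' hy'
    exact h.2.2 c' hc' c (List.mem_singleton_self c) y hy' hyB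

-- the A-side loop body is a plain modify
lemma pv_stepA (d : PySem.Dict (Int × Int) (List (Int × Int × Int))) (k : Int × Int) (v : Int × Int × Int) :
    ((if d.contains k then d else d.insert k ([] : List (Int × Int × Int))).modify k [] (fun old => old ++ [v]))
      = d.modify k [] (fun old => old ++ [v]) := by
  by_cases h : d.contains k = true
  · simp [PySem.Dict.modify, h]
  · have h' : d.contains k = false := by simpa using h
    rw [PySem.Dict.modify, PySem.Dict.modify, if_neg (by simp [h']), PySem.Dict.getD_insert_self,
      PySem.Dict.insert_insert_self, PySem.Dict.getD_of_not_contains _ _ h']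

-- A reduced to a flat fold over the product list
lemma pv_A_region (xmin xmax ymin ymax zmin zmax : Int) :
    build_region_by_chunk_py xmin xmax ymin ymax zmin zmax
      = ((pvProd (PySem.List.pyRange xmin (xmax + 1)) (PySem.List.pyRange ymin (ymax + 1)) (PySem.List.pyRange zmin (zmax + 1))).foldl
          (fun d v => d.modify (pvKey v) [] (fun old => old ++ [v])) PySem.Dict.empty).items.map (fun e => (e.1.1, e.1.2, e.2)) := by
  rw [build_region_by_chunk_py, pvProd]
  simp only [List.foldl_flatMap, List.foldl_map, pv_stepA, pvKey]

-- items of the A fold: first-occurrence keys, each with the filtered sublist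
lemma pv_A_items (l : List (Int × Int × Int)) :
    (l.foldl (fun d v => d.modify (pvKey v) [] (fun old => old ++ [v])) PySem.Dict.empty).items
      = (PySem.Set.ofList (l.map pvKey)).map (fun k => (k, l.filter (fun v => pvKey v == k))) := by
  have hkeys : (l.foldl (fun d v => d.modify (pvKey v) [] (fun old => old ++ [v])) PySem.Dict.empty).keys
      = PySem.Set.ofList (l.map pvKey) := by
    rw [PySem.Dict.keys_foldl_modify_key l pvKey [] (fun _ v => fun old => old ++ [v]) PySem.Dict.empty,
      PySem.Dict.keys_empty, PySem.Set.update_nil_left]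
  have hnodup : (l.foldl (fun d v => d.modify (pvKey v) [] (fun old => old ++ [v])) PySem.Dict.empty).keys.Nodup := by
    apply PySem.Dict.nodup_keys_foldl_modify_key l pvKey [] (fun _ v => fun old => old ++ [v]) PySem.Dict.empty
    rw [PySem.Dict.keys_empty]; exact List.nodup_nil
  have hgetD : ∀ c : Int × Int, (l.foldl (fun d v => d.modify (pvKey v) [] (fun old => old ++ [v])) PySem.Dict.empty).getD c []
      = l.filter (fun v => pvKey v == c) := by
    intro c
    have hfold : l.foldl (fun d v => d.modify (pvKey v) [] (fun old => old ++ [v])) PySem.Dict.empty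
        = (l.map (fun v => (pvKey v, v))).foldl (fun d p => d.modify p.1 [] (fun x => x ++ [p.2])) PySem.Dict.empty := by
      rw [List.foldl_map]
    rw [hfold, PySem.Dict.getD_foldl_modify_append, PySem.Dict.getD_empty, List.filter_map,
      List.map_map]
    simp [Function.comp_def]
  rw [PySem.Dict.items_eq_map_keys _ hnodup ([] : List (Int × Int × Int)), hkeys]
  apply List.map_congr_left
  intro k _
  rw [hgetD k]

-- the first-occurrence key set of the product is the chunk-pair product (nonempty box)
lemma pv_keys (xmin xmax ymin ymax zmin zmax : Int) (hx : xmin ≤ xmax) (hy : ymin ≤ ymax) (hz : zmin ≤ zmax) :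
    PySem.Set.ofList ((pvProd (PySem.List.pyRange xmin (xmax + 1)) (PySem.List.pyRange ymin (ymax + 1)) (PySem.List.pyRange zmin (zmax + 1))).map pvKey)
      = pvPairs xmin xmax zmin zmax := by
  have hY : PySem.List.pyRange ymin (ymax + 1) ≠ [] :=
    List.ne_nil_of_mem (a := ymin) (by rw [PySem.List.mem_pyRange_one]; omega)
  have h1 : (pvProd (PySem.List.pyRange xmin (xmax + 1)) (PySem.List.pyRange ymin (ymax + 1)) (PySem.List.pyRange zmin (zmax + 1))).map pvKey
      = (pvChunks xmin xmax).flatMap (fun cx => (pvClip xmin xmax cx).flatMap (fun _ =>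
          (PySem.List.pyRange ymin (ymax + 1)).flatMap (fun _ =>
            (PySem.List.pyRange zmin (zmax + 1)).map (fun z => (cx, PySem.Int.floordiv z 16))))) := by
    simp only [pvProd, List.map_flatMap, List.map_map, pvKey, Function.comp_def]
    rw [pv_range_decomp xmin xmax, List.flatMap_assoc]
    apply List.flatMap_congr
    intro cx hcx
    apply List.flatMap_congr
    intro x hxm
    rw [(pv_mem_clip hxm).2.2]
  rw [h1]
  rw [pv_ofList_flatMap_disjoint]
  · rw [pvPairs]
    apply List.flatMap_congr
    intro cx hcx
    rw [pv_ofList_flatMap_const _ _ (pv_clip_ne_nil hx hcx), pv_ofList_flatMap_const _ _ hY]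
    have h2 : (PySem.List.pyRange zmin (zmax + 1)).map (fun z => (cx, PySem.Int.floordiv z 16))
        = (pvChunks zmin zmax).flatMap (fun cz => (pvClip zmin zmax cz).flatMap (fun _ => [(cx, cz)])) := by
      rw [pv_range_decomp zmin zmax, List.map_flatMap]
      apply List.flatMap_congr
      intro cz hcz
      rw [← List.map_eq_flatMap]
      apply List.map_congr_left
      intro z hzm
      rw [(pv_mem_clip hzm).2.2]
    rw [h2, pv_ofList_flatMap_disjoint]
    · have h3 : (pvChunks zmin zmax).flatMap (fun cz => PySem.Set.ofList ((pvClip zmin zmax cz).flatMap (fun _ => [(cx, cz)])))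
          = (pvChunks zmin zmax).flatMap (fun cz => [(cx, cz)]) := by
        apply List.flatMap_congr
        intro cz hcz
        rw [pv_ofList_flatMap_const _ _ (pv_clip_ne_nil hz hcz)]
        exact PySem.Set.ofList_eq_self_of_nodup _ (by simp)
      rw [h3, ← List.map_eq_flatMap]
    · refine ((PySem.List.nodup_pyRange_one _ _).imp_of_mem ?_)
      intro cz cz' _ _ hne p hp hp'
      simp only [List.mem_flatMap, List.mem_singleton] at hp hp'
      obtain ⟨_, _, hp⟩ := hp
      obtain ⟨_, _, hp'⟩ := hp'
      exact hne (Prod.ext_iff.mp (hp ▸ hp')).2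
  · refine ((PySem.List.nodup_pyRange_one _ _).imp_of_mem ?_)
    intro cx cx' _ _ hne p hp hp'
    simp only [List.mem_flatMap, List.mem_map] at hp hp'
    obtain ⟨_, _, _, _, _, _, hp⟩ := hp
    obtain ⟨_, _, _, _, _, _, hp'⟩ := hp'
    exact hne (Prod.ext_iff.mp (hp.trans hp'.symm)).1

lemma pv_flatMap_guard {α β : Type} (l : List α) (q : α → Bool) (f : α → List β) :
    l.flatMap (fun a => if q a then f a else []) = (l.filter q).flatMap f := by
  induction l with
  | nil => rfl
  | cons a t ih => by_cases h : q a <;> simp [h, ih]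

-- the per-key filter of the product is the clipped product
lemma pv_filter_key (xmin xmax ymin ymax zmin zmax : Int) (k : Int × Int) :
    (pvProd (PySem.List.pyRange xmin (xmax + 1)) (PySem.List.pyRange ymin (ymax + 1)) (PySem.List.pyRange zmin (zmax + 1))).filter (fun v => pvKey v == k)
      = pvProd (pvClip xmin xmax k.1) (PySem.List.pyRange ymin (ymax + 1)) (pvClip zmin zmax k.2) := by
  obtain ⟨cx, cz⟩ := k
  rw [pvProd, List.filter_flatMap]
  have h1 : ∀ x : Int, ((PySem.List.pyRange ymin (ymax + 1)).flatMap (fun y => (PySem.List.pyRange zmin (zmax + 1)).map (fun z => (x, y, z)))).filter (fun v => pvKey v == (cx, cz))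
      = if PySem.Int.floordiv x 16 == cx then (PySem.List.pyRange ymin (ymax + 1)).flatMap (fun y => (pvClip zmin zmax cz).map (fun z => (x, y, z))) else [] := by
    intro x
    rw [List.filter_flatMap]
    by_cases hc : PySem.Int.floordiv x 16 = cx
    all_goals rw [PySem.Int.floordiv_eq_ediv_of_pos (by norm_num : (0:Int) < 16)] at hc
    · rw [if_pos (by simp [hc])]
      apply List.flatMap_congr
      intro y _
      rw [List.filter_map]
      have : ((fun v => pvKey v == (cx, cz)) ∘ fun z => (x, y, z)) = (fun n => PySem.Int.floordiv n 16 == cz) := by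
        funext z
        simp [pvKey, Function.comp_def, Prod.ext_iff, hc]
      rw [this, pv_filter_chunk]
    · rw [if_neg (by simp [hc])]
      rw [List.flatMap_eq_nil_iff]
      intro y _
      rw [List.filter_map, List.map_eq_nil_iff, List.filter_eq_nil_iff]
      intro z _
      simp [pvKey, Function.comp_def, Prod.ext_iff, hc]
  rw [List.flatMap_congr (fun x _ => h1 x), pv_flatMap_guard, pv_filter_chunk, pvProd]

-- B reduced to a flat fold over the chunk-pair list
lemma pv_B_region (xmin xmax ymin ymax zmin zmax : Int) (h : ¬(xmin > xmax ∨ ymin > ymax ∨ zmin > zmax)) :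
    build_region_by_chunk_py_alt xmin xmax ymin ymax zmin zmax
      = ((pvPairs xmin xmax zmin zmax).foldl (fun d p =>
            d.insert (p.1, p.2) (pvProd (pvClip xmin xmax p.1) (PySem.List.pyRange ymin (ymax + 1)) (pvClip zmin zmax p.2))) PySem.Dict.empty).items.map (fun e => (e.1.1, e.1.2, e.2)) := by
  rw [build_region_by_chunk_py_alt, if_neg h, pvPairs, List.foldl_flatMap]
  simp only [List.foldl_map, pvChunks, pvClip, pvProd]

lemma pv_pairs_nodup (xmin xmax zmin zmax : Int) : (pvPairs xmin xmax zmin zmax).Nodup := by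
  rw [pvPairs]
  show List.Pairwise _ _
  rw [List.pairwise_flatMap]
  constructor
  · intro cx _
    exact (PySem.List.nodup_pyRange_one _ _).map (fun a b h => (Prod.ext_iff.mp h).2)
  · refine ((PySem.List.nodup_pyRange_one _ _).imp_of_mem ?_)
    intro cx cx' _ _ hne p hp p' hp'
    rw [List.mem_map] at hp hp'
    obtain ⟨_, _, hp⟩ := hp
    obtain ⟨_, _, hp'⟩ := hp'
    exact fun he => hne (Prod.ext_iff.mp ((hp.trans he).trans hp'.symm)).1

-- ===== VERDICT (by name: the statement is the Claim_ definition above) =====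
theorem build_region_by_chunk_py_spec : Claim_equal_build_region_by_chunk_py := by
  intro xmin xmax ymin ymax zmin zmax _
  unfold Spec_build_region_by_chunk_py
  rw [pv_A_region, pv_A_items]
  by_cases h : xmin > xmax ∨ ymin > ymax ∨ zmin > zmax
  · have hl : pvProd (PySem.List.pyRange xmin (xmax + 1)) (PySem.List.pyRange ymin (ymax + 1)) (PySem.List.pyRange zmin (zmax + 1)) = [] := by
      rcases h with hc | hc | hc
      · rw [pvProd, PySem.List.pyRange_one_eq_nil (by omega : xmax + 1 ≤ xmin), List.flatMap_nil]
      · rw [pvProd, List.flatMap_eq_nil_iff]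
        intro x _
        rw [PySem.List.pyRange_one_eq_nil (by omega : ymax + 1 ≤ ymin), List.flatMap_nil]
      · rw [pvProd, List.flatMap_eq_nil_iff]
        intro x _
        rw [List.flatMap_eq_nil_iff]
        intro y _
        rw [PySem.List.pyRange_one_eq_nil (by omega : zmax + 1 ≤ zmin), List.map_nil]
    rw [hl, build_region_by_chunk_py_alt, if_pos h]
    rfl
  · have hx : xmin ≤ xmax := by omega
    have hy : ymin ≤ ymax := by omega
    have hz : zmin ≤ zmax := by omega
    rw [pv_B_region xmin xmax ymin ymax zmin zmax h, pv_keys xmin xmax ymin ymax zmin zmax hx hy hz]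
    rw [PySem.Dict.items_foldl_insert_fresh (pvPairs xmin xmax zmin zmax) (fun p => (p.1, p.2))
      (fun p => pvProd (pvClip xmin xmax p.1) (PySem.List.pyRange ymin (ymax + 1)) (pvClip zmin zmax p.2))
      PySem.Dict.empty (fun _ _ => PySem.Dict.contains_empty _)
      (by simpa [Prod.mk.eta, List.map_id] using pv_pairs_nodup xmin xmax zmin zmax)]
    have hempty : (PySem.Dict.empty : PySem.Dict (Int × Int) (List (Int × Int × Int))).items = [] := rfl
    rw [hempty, List.nil_append]
    apply congrArg
    apply List.map_congr_left
    intro k _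
    rw [pv_filter_key xmin xmax ymin ymax zmin zmax k]
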